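-- pv_equiv track=rewrite | github.com/kay-ou/SimTradeLab | src/simtradelab/server/routers/editor.py | _insert_from_doc
-- ===== SOURCE A (Python) =====
-- def _insert_from_doc(name: str, params_str: str) -> str:
--     """从文档参数字符串生成 insertText（所有参数，None 作为占位符）。"""
--     if not params_str:
--         return f"{name}()"
--     parts: list[str] = []
--     i = 1
--     for p in params_str.split(","):
--         p = p.strip()
--         param_name = p.split("=")[0].strip()
--         if param_name in ("self",):
--             continue
--         if param_name == "context":
--             parts.append("context")
--             continue
--         has_default = "=" in p
--         default_val = p.split("=", 1)[1].strip() if has_default else None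
--         if not has_default:
--             parts.append(f"${{{i}:{param_name}}}")
--         elif default_val:
--             parts.append(f"${{{i}:{default_val}}}")
--         else:
--             parts.append(f"${{{i}:None}}")
--         i += 1
--     return f"{name}({', '.join(parts)})"
-- ===== SOURCE B (Python) =====
-- def _insert_from_doc(name: str, params_str: str) -> str:
--     """Two-pass rewrite: first build a descriptor list (None = literal context,
--     str = placeholder text), then render with a counter that only advances on
--     placeholders."""
--     if not params_str:
--         return f"{name}()"
--     descs = []
--     for raw in params_str.split(","):
--         p = raw.strip()
--         pname = p.split("=")[0].strip()
--         if pname == "self":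
--             continue
--         if pname == "context":
--             descs.append(None)
--         elif "=" in p:
--             dv = p.split("=", 1)[1].strip()
--             descs.append(dv or "None")
--         else:
--             descs.append(pname)
--     out = []
--     i = 1
--     for d in descs:
--         if d is None:
--             out.append("context")
--         else:
--             out.append("${%d:%s}" % (i, d))
--             i += 1
--     return "%s(%s)" % (name, ", ".join(out))
-- ===== Notes on version B (the rewrite author's own statement) =====
-- stated objective: alternative
-- what changed: Replaces A's single counted loop (parts list plus inline counter and three placeholder branches) by a two-pass decomposition: a first pass builds a descriptor list (skip self, None marker for context, one text per placeholder using the 'or' idiom for empty defaults), and a second pass renders it with a counter that advances only on placeholders.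
import Mathlib
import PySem

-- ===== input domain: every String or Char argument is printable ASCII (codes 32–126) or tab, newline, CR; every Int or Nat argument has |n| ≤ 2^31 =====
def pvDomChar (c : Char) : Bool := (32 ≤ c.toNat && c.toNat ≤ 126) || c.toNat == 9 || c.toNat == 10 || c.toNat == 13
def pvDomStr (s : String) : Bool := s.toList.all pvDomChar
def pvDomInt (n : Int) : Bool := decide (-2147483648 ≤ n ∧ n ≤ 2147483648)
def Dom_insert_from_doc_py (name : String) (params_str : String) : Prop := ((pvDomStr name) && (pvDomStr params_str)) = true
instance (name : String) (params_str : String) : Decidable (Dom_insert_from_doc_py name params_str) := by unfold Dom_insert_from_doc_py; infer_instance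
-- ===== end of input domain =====

-- B re-decomposes A's single counted loop into two passes (descriptor list, then a
-- counted render) and folds the empty-default case with the `or` idiom; objective:
-- alternative decomposition, same cost.

-- ===== PORT A =====
-- loop body of A's single for-loop, state = (parts, i)
def pvAStep (st : List String × Int) (p0 : String) : List String × Int :=
  let p := PySem.Str.strip p0
  let param_name := PySem.Str.strip (((PySem.Str.split? p "=").getD []).headD "")
  if param_name == "self" then st
  else if param_name == "context" then (st.1 ++ ["context"], st.2)
  else
    let has_default := PySem.Str.isIn "=" p
    let default_val : Option String :=
      if has_default then some (PySem.Str.strip (((PySem.Str.splitMax? p "=" 1).getD []).getD 1 "")) else none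
    if !has_default then
      (st.1 ++ ["${" ++ PySem.Int.toStr st.2 ++ ":" ++ param_name ++ "}"], st.2 + 1)
    else if !(default_val.getD "" == "") then
      (st.1 ++ ["${" ++ PySem.Int.toStr st.2 ++ ":" ++ default_val.getD "" ++ "}"], st.2 + 1)
    else
      (st.1 ++ ["${" ++ PySem.Int.toStr st.2 ++ ":None}"], st.2 + 1)

def insert_from_doc_py (name : String) (params_str : String) : String :=
  if params_str == "" then name ++ "()"
  else
    let st := ((PySem.Str.split? params_str ",").getD []).foldl pvAStep ([], 1)
    name ++ "(" ++ PySem.Str.join ", " st.1 ++ ")"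

-- ===== PORT B =====
-- first pass: one descriptor per kept comma piece (none = literal "context",
-- some d = placeholder with text d); 'self' pieces are dropped
def pvBDesc (raw : String) : Option (Option String) :=
  let p := PySem.Str.strip raw
  let pname := PySem.Str.strip (((PySem.Str.split? p "=").getD []).headD "")
  if pname == "self" then none
  else if pname == "context" then some none
  else if PySem.Str.isIn "=" p then
    let dv := PySem.Str.strip (((PySem.Str.splitMax? p "=" 1).getD []).getD 1 "")
    some (some (if dv == "" then "None" else dv))
  else some (some pname)

-- second pass: render, the counter advancing only on placeholders
def pvBRender : List (Option String) → Int → List String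
  | [], _ => []
  | none :: t, i => "context" :: pvBRender t i
  | some d :: t, i => ("${" ++ PySem.Int.toStr i ++ ":" ++ d ++ "}") :: pvBRender t (i + 1)

def insert_from_doc_py_alt (name : String) (params_str : String) : String :=
  if params_str == "" then name ++ "()"
  else
    let parts := pvBRender (((PySem.Str.split? params_str ",").getD []).filterMap pvBDesc) 1
    name ++ "(" ++ PySem.Str.join ", " parts ++ ")"

-- ===== PRECONDITION & SPEC =====
def Spec_insert_from_doc_py (name : String) (params_str : String) (out : String) : Prop := out = insert_from_doc_py_alt name params_str
instance (name : String) (params_str : String) (out : String) : Decidable (Spec_insert_from_doc_py name params_str out) := by unfold Spec_insert_from_doc_py; infer_instance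

-- ===== CLAIM (what is proved, stated in full; the proofs are below) =====
def Claim_equal_insert_from_doc_py : Prop := ∀ (name : String) (params_str : String), Dom_insert_from_doc_py name params_str → Spec_insert_from_doc_py name params_str (insert_from_doc_py name params_str)

-- ===== LEMMAS AND PROOFS =====

-- one step of A's loop, read through B's descriptor classification
theorem pvStep_desc (p : String) (acc : List String) (i : Int) :
    pvAStep (acc, i) p =
      match pvBDesc p with
      | none => (acc, i)
      | some none => (acc ++ ["context"], i)
      | some (some d) => (acc ++ ["${" ++ PySem.Int.toStr i ++ ":" ++ d ++ "}"], i + 1) := by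
  simp only [pvAStep, pvBDesc]
  split_ifs <;> simp_all [String.append_assoc]

-- loop invariant: A's fold over the pieces extends the accumulator by exactly
-- B's rendering of B's descriptors, starting at the same counter
theorem pvFold_eq_render (ps : List String) :
    ∀ (acc : List String) (i : Int),
      (ps.foldl pvAStep (acc, i)).1 = acc ++ pvBRender (ps.filterMap pvBDesc) i := by
  induction ps with
  | nil => intro acc i; simp [pvBRender]
  | cons p t ih =>
    intro acc i
    simp only [List.foldl_cons, List.filterMap_cons, pvStep_desc]
    cases h : pvBDesc p with
    | none => simpa using ih acc i
    | some d =>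
      cases d with
      | none => simp [pvBRender, ih]
      | some s => simp [pvBRender, ih]

-- ===== VERDICT (by name: the statement is the Claim_ definition above) =====
theorem insert_from_doc_py_spec : Claim_equal_insert_from_doc_py := by
  intro name params_str _
  unfold Spec_insert_from_doc_py insert_from_doc_py insert_from_doc_py_alt
  by_cases h : params_str == ""
  · simp [h]
  · simp [h, pvFold_eq_render]
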